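-- pv_equiv track=rewrite | github.com/vanders30/Daspro | Tugas Daspro 3.3.py | gabung_jadwal
-- ===== SOURCE A (Python) =====
-- def gabung_jadwal(jadwal1, jadwal2):
--     gabungan_jadwal = jadwal2.copy()  # Salin jadwal IF3 ke dictionary gabungan
--     for hari, waktu in jadwal1.items():
--         # Jika hari sudah ada di dictionary gabungan, gabungkan waktu
--         if hari in gabungan_jadwal:
--             gabungan_jadwal[hari] += ", " + waktu
--         else:
--             # Jika hari belum ada, tambahkan ke dictionary gabungan
--             gabungan_jadwal[hari] = waktu
--     return gabungan_jadwal
-- ===== SOURCE B (Python) =====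
-- def gabung_jadwal(jadwal1, jadwal2):
--     hasil = {}
--     for hari in list(jadwal2) + [h for h in jadwal1 if h not in jadwal2]:
--         if hari in jadwal2 and hari in jadwal1:
--             nilai = jadwal2[hari] + ", " + jadwal1[hari]
--         elif hari in jadwal2:
--             nilai = jadwal2[hari]
--         else:
--             nilai = jadwal1[hari]
--         hasil[hari] = nilai
--     return hasil
-- ===== Notes on version B (the rewrite author's own statement) =====
-- stated objective: alternative
-- what changed: B builds a fresh dict in one keyed pass over the union of keys (jadwal2 keys then jadwal1-only keys) with a three-way branch per key, instead of copying jadwal2 and patching it entry by entry.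
import Mathlib
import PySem

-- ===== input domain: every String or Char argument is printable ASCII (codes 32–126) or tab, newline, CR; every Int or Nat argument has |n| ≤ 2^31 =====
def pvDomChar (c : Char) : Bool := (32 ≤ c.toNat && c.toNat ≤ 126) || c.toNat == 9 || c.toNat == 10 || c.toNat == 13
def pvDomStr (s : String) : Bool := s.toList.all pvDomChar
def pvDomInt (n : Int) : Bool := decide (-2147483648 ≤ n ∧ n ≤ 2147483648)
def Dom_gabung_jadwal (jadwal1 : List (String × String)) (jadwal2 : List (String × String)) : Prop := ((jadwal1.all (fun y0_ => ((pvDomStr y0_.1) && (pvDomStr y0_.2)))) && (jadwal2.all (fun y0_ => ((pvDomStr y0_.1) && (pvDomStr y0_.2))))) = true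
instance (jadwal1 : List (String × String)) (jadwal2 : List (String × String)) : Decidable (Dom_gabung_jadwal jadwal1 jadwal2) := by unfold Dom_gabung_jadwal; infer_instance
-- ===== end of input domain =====

-- B rebuilds the result in one keyed pass over the union of day keys (jadwal2 days first,
-- then jadwal1-only days) with a three-way branch, instead of copying jadwal2 and patching it
-- (objective: alternative decomposition; same asymptotic cost).

-- ===== PORT A =====
-- loop body of A ('for hari, waktu in jadwal1.items(): …')
def pvStepA (gab : PySem.Dict String String) (p : String × String) : PySem.Dict String String :=
  if gab.contains p.1 then gab.insert p.1 (gab.getD p.1 "" ++ ", " ++ p.2)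
  else gab.insert p.1 p.2

def gabung_jadwal (jadwal1 : List (String × String)) (jadwal2 : List (String × String)) : List (String × String) :=
  let gabungan := PySem.Dict.ofList jadwal2     -- jadwal2.copy()
  ((PySem.Dict.ofList jadwal1).items.foldl pvStepA gabungan).items

-- ===== PORT B =====
def gabung_jadwal_alt (jadwal1 : List (String × String)) (jadwal2 : List (String × String)) : List (String × String) :=
  let d1 := PySem.Dict.ofList jadwal1
  let d2 := PySem.Dict.ofList jadwal2
  let days := d2.keys ++ d1.keys.filter (fun h => !(d2.contains h))   -- list(jadwal2) + [h for h in jadwal1 if h not in jadwal2]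
  (days.foldl (fun hasil hari =>
      hasil.insert hari
        (if d2.contains hari && d1.contains hari then d2.getD hari "" ++ ", " ++ d1.getD hari ""
         else if d2.contains hari then d2.getD hari ""
         else d1.getD hari "")) PySem.Dict.empty).items

-- ===== PRECONDITION & SPEC =====
def Spec_gabung_jadwal (jadwal1 : List (String × String)) (jadwal2 : List (String × String)) (out : List (String × String)) : Prop := out = gabung_jadwal_alt jadwal1 jadwal2
instance (jadwal1 : List (String × String)) (jadwal2 : List (String × String)) (out : List (String × String)) : Decidable (Spec_gabung_jadwal jadwal1 jadwal2 out) := by unfold Spec_gabung_jadwal; infer_instance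

-- ===== CLAIM (what is proved, stated in full; the proofs are below) =====
def Claim_equal_gabung_jadwal : Prop := ∀ (jadwal1 : List (String × String)) (jadwal2 : List (String × String)), Dom_gabung_jadwal jadwal1 jadwal2 → Spec_gabung_jadwal jadwal1 jadwal2 (gabung_jadwal jadwal1 jadwal2)

-- ===== LEMMAS AND PROOFS =====

-- first-match lookup in an association list (used only in proofs)
def pvLk (x : String) : List (String × String) → Option String
  | [] => none
  | (k, v) :: rest => if k = x then some v else pvLk x rest

theorem pvLk_eq_none (x : String) (l : List (String × String)) (h : x ∉ l.map Prod.fst) :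
    pvLk x l = none := by
  induction l with
  | nil => rfl
  | cons p rest ih =>
    simp only [List.map_cons, List.mem_cons] at h
    push Not at h
    simp [pvLk, Ne.symm h.1, ih h.2]

theorem pvLk_eq_get? (x : String) (d : PySem.Dict String String) :
    pvLk x d.items = d.get? x := by
  obtain ⟨l⟩ := d
  induction l with
  | nil => simp [pvLk, PySem.Dict.get?]
  | cons p rest ih =>
    obtain ⟨k, v⟩ := p
    rw [show (PySem.Dict.mk ((k, v) :: rest)).items = (k, v) :: rest from rfl,
        PySem.Dict.get?_mk_cons]
    by_cases hk : k = x
    · simp [pvLk, hk]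
    · simp only [pvLk, beq_iff_eq, if_neg hk]
      exact ih

-- characterisation of A's loop
theorem pvFoldA_items (l : List (String × String)) (d : PySem.Dict String String)
    (hl : (l.map Prod.fst).Nodup) (hd : d.keys.Nodup) :
    (l.foldl pvStepA d).items
      = d.items.map (fun q => match pvLk q.1 l with
          | some w => (q.1, q.2 ++ ", " ++ w)
          | none => q)
        ++ l.filter (fun p => !(d.contains p.1)) := by
  induction l generalizing d with
  | nil => simp [pvLk]
  | cons p rest ih =>
    obtain ⟨k, w⟩ := p
    simp only [List.map_cons, List.nodup_cons] at hl
    obtain ⟨hk, hrest⟩ := hl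
    by_cases hc : d.contains k = true
    · -- day already present: value patched in place, key order preserved
      have hstep : pvStepA d (k, w) = d.insert k (d.getD k "" ++ ", " ++ w) := by
        simp [pvStepA, hc]
      rw [List.foldl_cons, hstep, ih _ hrest (PySem.Dict.nodup_keys_insert _ _ _ hd)]
      rw [PySem.Dict.items_insert_of_contains _ _ hc, List.map_map]
      congr 1
      · apply List.map_congr_left
        intro q hq
        obtain ⟨a, b⟩ := q
        by_cases hqk : a = k
        · subst hqk
          have hv : d.getD a "" = b := PySem.Dict.getD_of_mem_items _ (by exact hq) hd ""
          simp [pvLk, pvLk_eq_none a rest hk, hv]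
        · simp [pvLk, hqk, Ne.symm hqk]
      · rw [List.filter_cons, show (!(d.contains (k, w).1)) = false by simp [hc],
            if_neg Bool.false_ne_true]
        apply List.filter_congr
        intro q hq
        have hqk : q.1 ≠ k := fun h => hk (h ▸ List.mem_map_of_mem hq)
        rw [PySem.Dict.contains_insert]
        simp [hqk]
    · -- new day: appended at the end
      have hc' : d.contains k = false := by simpa using hc
      have hstep : pvStepA d (k, w) = d.insert k w := by simp [pvStepA, hc']
      rw [List.foldl_cons, hstep, ih _ hrest (PySem.Dict.nodup_keys_insert _ _ _ hd)]
      rw [PySem.Dict.items_insert_of_not_contains _ _ hc']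
      rw [List.map_append, List.filter_cons]
      simp only [hc', Bool.not_false]
      have hmap : d.items.map (fun q => match pvLk q.1 rest with
            | some w => (q.1, q.2 ++ ", " ++ w)
            | none => q)
          = d.items.map (fun q => match pvLk q.1 ((k, w) :: rest) with
            | some w => (q.1, q.2 ++ ", " ++ w)
            | none => q) := by
        apply List.map_congr_left
        intro q hq
        have hqk : q.1 ≠ k := by
          intro h
          have : d.contains q.1 = true := (PySem.Dict.contains_iff_mem_keys _ _).mpr
            (List.mem_map_of_mem hq)
          rw [h] at this; rw [this] at hc'; exact absurd hc' (by simp)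
        simp [pvLk, Ne.symm hqk]
      have hhead : (fun q => match pvLk q.1 rest with
            | some w => (q.1, q.2 ++ ", " ++ w)
            | none => q) (k, w) = (k, w) := by
        simp [pvLk_eq_none k rest hk]
      have hfil : rest.filter (fun p => !((d.insert k w).contains p.1))
          = rest.filter (fun p => !(d.contains p.1)) := by
        apply List.filter_congr
        intro q hq
        have hqk : q.1 ≠ k := fun h => hk (h ▸ List.mem_map_of_mem hq)
        rw [PySem.Dict.contains_insert]
        simp [hqk]
      rw [hmap, hfil]
      simp [hhead]

-- the per-day value B assigns
theorem pvAlt_items (jadwal1 jadwal2 : List (String × String)) :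
    gabung_jadwal_alt jadwal1 jadwal2
      = ((PySem.Dict.ofList jadwal2).keys
          ++ (PySem.Dict.ofList jadwal1).keys.filter
               (fun h => !((PySem.Dict.ofList jadwal2).contains h))).map
          (fun h => (h,
            if (PySem.Dict.ofList jadwal2).contains h && (PySem.Dict.ofList jadwal1).contains h
            then (PySem.Dict.ofList jadwal2).getD h "" ++ ", " ++ (PySem.Dict.ofList jadwal1).getD h ""
            else if (PySem.Dict.ofList jadwal2).contains h then (PySem.Dict.ofList jadwal2).getD h ""
            else (PySem.Dict.ofList jadwal1).getD h "")) := by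
  set d1 := PySem.Dict.ofList jadwal1 with hd1
  set d2 := PySem.Dict.ofList jadwal2 with hd2
  have hnodup : ((d2.keys ++ d1.keys.filter (fun h => !(d2.contains h))).map id).Nodup := by
    rw [List.map_id]
    apply List.Nodup.append
    · exact PySem.Dict.nodup_keys_ofList _
    · exact (PySem.Dict.nodup_keys_ofList _).filter _
    · intro h h2 hf
      have := List.of_mem_filter hf
      rw [(PySem.Dict.contains_iff_mem_keys _ _).mpr h2] at this
      simp at this
  have hfresh : ∀ a ∈ d2.keys ++ d1.keys.filter (fun h => !(d2.contains h)),
      (PySem.Dict.empty : PySem.Dict String String).contains (id a) = false := by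
    intro a _; exact PySem.Dict.contains_empty a
  have := PySem.Dict.items_foldl_insert_fresh
      (l := d2.keys ++ d1.keys.filter (fun h => !(d2.contains h)))
      (k := id)
      (v := fun h =>
        if d2.contains h && d1.contains h then d2.getD h "" ++ ", " ++ d1.getD h ""
        else if d2.contains h then d2.getD h ""
        else d1.getD h "")
      (d := PySem.Dict.empty) hfresh hnodup
  simpa [gabung_jadwal_alt, ← hd1, ← hd2] using this

-- ===== VERDICT (by name: the statement is the Claim_ definition above) =====
theorem gabung_jadwal_spec : Claim_equal_gabung_jadwal := by
  intro jadwal1 jadwal2 _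
  unfold Spec_gabung_jadwal
  set d1 := PySem.Dict.ofList jadwal1 with hd1
  set d2 := PySem.Dict.ofList jadwal2 with hd2
  have hn1 : d1.keys.Nodup := PySem.Dict.nodup_keys_ofList _
  have hn2 : d2.keys.Nodup := PySem.Dict.nodup_keys_ofList _
  have hA : gabung_jadwal jadwal1 jadwal2
      = d2.items.map (fun q => match pvLk q.1 d1.items with
          | some w => (q.1, q.2 ++ ", " ++ w)
          | none => q)
        ++ d1.items.filter (fun p => !(d2.contains p.1)) := by
    unfold gabung_jadwal
    rw [← hd1, ← hd2]
    exact pvFoldA_items d1.items d2 hn1 hn2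
  rw [hA, pvAlt_items, ← hd1, ← hd2, List.map_append]
  congr 1
  · -- part over jadwal2's keys
    rw [PySem.Dict.items_eq_map_keys d2 hn2 "", List.map_map]
    apply List.map_congr_left
    intro h hh
    have hc2 : d2.contains h = true := (PySem.Dict.contains_iff_mem_keys _ _).mpr hh
    rw [Function.comp_apply, pvLk_eq_get?]
    cases hg : d1.get? h with
    | some w =>
      have hc1 : d1.contains h = true := by
        rw [PySem.Dict.contains_eq_isSome_get?, hg]; rfl
      have : d1.getD h "" = w := PySem.Dict.getD_of_get?_eq_some _ "" hg
      simp [hc1, hc2, this]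
    | none =>
      have hc1 : d1.contains h = false := by
        rw [PySem.Dict.contains_eq_isSome_get?, hg]; rfl
      simp [hc1, hc2]
  · -- part over jadwal1-only keys
    rw [PySem.Dict.items_eq_map_keys d1 hn1 "", List.filter_map]
    simp only [Function.comp_def]
    apply List.map_congr_left
    intro h hh
    have hc2 : d2.contains h = false := by simpa using List.of_mem_filter hh
    simp [hc2]
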